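-- pv_equiv track=rewrite | github.com/DJE98/advent-of-code-2023 | day2/game_analyser.py | search_minimal_requirements_per_rounds
-- ===== SOURCE A (Python) =====
-- from typing import Tuple, List
--
-- def search_minimal_requirements_per_rounds(
--     game_rounds: Tuple[Tuple[int, ...], ...]
-- ):
--     min_values: List[int] = [0 for _ in range(len(game_rounds[0]))]
--     for game_round in game_rounds:
--         for i, color in enumerate(game_round):
--             if color > min_values[i]:
--                 min_values[i] = color
--     return tuple(min_values)
-- ===== SOURCE B (Python) =====
-- def search_minimal_requirements_per_rounds(game_rounds):
--     return tuple(
--         max([0] + [r[i] for r in game_rounds if i < len(r)])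
--         for i in range(len(game_rounds[0]))
--     )
-- ===== Notes on version B (the rewrite author's own statement) =====
-- stated objective: idiomatic
-- what changed: Replaces the row-major running-max accumulator list with a column-wise reduction: for each column index of the first round, take the max of that column's present values floored at 0.
import Mathlib
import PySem

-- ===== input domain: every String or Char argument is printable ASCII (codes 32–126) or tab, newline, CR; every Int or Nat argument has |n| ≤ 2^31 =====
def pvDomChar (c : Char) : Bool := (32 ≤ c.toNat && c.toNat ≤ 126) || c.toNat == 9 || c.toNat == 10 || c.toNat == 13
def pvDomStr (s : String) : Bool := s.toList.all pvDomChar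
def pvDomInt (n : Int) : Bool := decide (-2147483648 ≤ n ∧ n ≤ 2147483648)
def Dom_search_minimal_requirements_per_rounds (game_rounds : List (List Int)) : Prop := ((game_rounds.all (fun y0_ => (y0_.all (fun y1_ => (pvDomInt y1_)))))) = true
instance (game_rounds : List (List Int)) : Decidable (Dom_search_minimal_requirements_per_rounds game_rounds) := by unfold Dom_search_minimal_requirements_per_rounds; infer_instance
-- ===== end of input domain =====

-- B replaces A's row-major running-max accumulator with a column-wise max reduction (same cost, more idiomatic).

-- ===== PORT A =====
-- inner loop: `for i, color in enumerate(game_round): if color > min_values[i]: min_values[i] = color`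
def pvARow : List Int → Nat → List Int → List Int
  | mv, _, [] => mv
  | mv, i, c :: rest => pvARow (if c > mv.getD i 0 then mv.set i c else mv) (i + 1) rest

def search_minimal_requirements_per_rounds (game_rounds : List (List Int)) : List Int :=
  let min_values := List.replicate (game_rounds.headD []).length (0 : Int)
  game_rounds.foldl (fun mv r => pvARow mv 0 r) min_values

-- ===== PORT B =====
-- max([0] + [r[i] for r in game_rounds if i < len(r)])
def pvBCol (game_rounds : List (List Int)) (i : Nat) : Int :=
  (game_rounds.filterMap (fun r => if i < r.length then r[i]? else none)).foldl max 0

def search_minimal_requirements_per_rounds_alt (game_rounds : List (List Int)) : List Int :=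
  (List.range (game_rounds.headD []).length).map (pvBCol game_rounds)

-- ===== PRECONDITION & SPEC =====
-- Pre_ excludes exactly the inputs on which Python A raises IndexError: the empty tuple
-- (game_rounds[0]) and ragged inputs with a round longer than the first (min_values[i]).
def Pre_search_minimal_requirements_per_rounds (game_rounds : List (List Int)) : Prop :=
  game_rounds ≠ [] ∧ ∀ r ∈ game_rounds, r.length ≤ (game_rounds.headD []).length
instance (game_rounds : List (List Int)) : Decidable (Pre_search_minimal_requirements_per_rounds game_rounds) := by unfold Pre_search_minimal_requirements_per_rounds; infer_instance

def pvWitness_search_minimal_requirements_per_rounds : List (List Int) := [[1, 2], [3]]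

def Spec_search_minimal_requirements_per_rounds (game_rounds : List (List Int)) (out : List Int) : Prop := out = search_minimal_requirements_per_rounds_alt game_rounds
instance (game_rounds : List (List Int)) (out : List Int) : Decidable (Spec_search_minimal_requirements_per_rounds game_rounds out) := by unfold Spec_search_minimal_requirements_per_rounds; infer_instance

-- ===== CLAIM (what is proved, stated in full; the proofs are below) =====
def Claim_equal_search_minimal_requirements_per_rounds : Prop := ∀ (game_rounds : List (List Int)), Dom_search_minimal_requirements_per_rounds game_rounds → Pre_search_minimal_requirements_per_rounds game_rounds → Spec_search_minimal_requirements_per_rounds game_rounds (search_minimal_requirements_per_rounds game_rounds)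

-- ===== LEMMAS AND PROOFS =====

theorem pvARow_length (r : List Int) (mv : List Int) (i : Nat) :
    (pvARow mv i r).length = mv.length := by
  induction r generalizing mv i with
  | nil => rfl
  | cons c rest ih => simp only [pvARow]; rw [ih]; split <;> simp

theorem pvARow_getD (r : List Int) (mv : List Int) (i j : Nat)
    (hlen : i + r.length ≤ mv.length) (hj : j < mv.length) :
    (pvARow mv i r).getD j 0 =
      if i ≤ j ∧ j < i + r.length then max (mv.getD j 0) (r.getD (j - i) 0)
      else mv.getD j 0 := by
  induction r generalizing mv i with
  | nil => simp [pvARow]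
  | cons c rest ih =>
    simp only [pvARow, List.length_cons] at *
    have hi : i < mv.length := by omega
    set mv' := if c > mv.getD i 0 then mv.set i c else mv with hmv'
    have hlen' : mv'.length = mv.length := by rw [hmv']; split <;> simp
    have hget : ∀ k, k < mv.length →
        mv'.getD k 0 = if k = i then max (mv.getD i 0) c else mv.getD k 0 := by
      intro k hk
      have hgd : mv.getD k 0 = mv[k] := by simp [List.getD, List.getElem?_eq_getElem hk]
      rw [hmv']
      by_cases hki : k = i
      · subst hki
        rw [if_pos rfl]
        split <;> rename_i hc
        · have hs : (mv.set k c).getD k 0 = c := by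
            simp [List.getD, hk]
          rw [hs]; omega
        · omega
      · rw [if_neg hki]
        split
        · simp [List.getD, List.getElem?_set_ne (fun h => hki h.symm)]
        · rfl
    rw [ih mv' (i + 1) (by omega) (by omega)]
    by_cases hji : j = i
    · subst hji
      rw [if_neg (by omega), hget j hi, if_pos rfl, if_pos (by omega)]
      simp
    · rw [hget j hj, if_neg hji]
      by_cases hr : i + 1 ≤ j ∧ j < i + 1 + rest.length
      · rw [if_pos hr, if_pos (by omega)]
        have : j - i = (j - (i + 1)) + 1 := by omega
        rw [this]
        simp [List.getD]
      · rw [if_neg hr, if_neg (by omega)]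

theorem pvFold_getD (gr : List (List Int)) (mv : List Int) (j : Nat)
    (hj : j < mv.length) (hb : ∀ r ∈ gr, r.length ≤ mv.length) :
    (gr.foldl (fun mv r => pvARow mv 0 r) mv).getD j 0 =
      (gr.filterMap (fun r => if j < r.length then r[j]? else none)).foldl max (mv.getD j 0) := by
  induction gr generalizing mv with
  | nil => rfl
  | cons r rest ih =>
    simp only [List.foldl_cons, List.filterMap_cons]
    have hr : r.length ≤ mv.length := hb r (by simp)
    have hlen : (pvARow mv 0 r).length = mv.length := pvARow_length r mv 0
    have hstep : (pvARow mv 0 r).getD j 0 =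
        if j < r.length then max (mv.getD j 0) (r.getD j 0) else mv.getD j 0 := by
      rw [pvARow_getD r mv 0 j (by omega) hj]
      simp
    rw [ih (pvARow mv 0 r) (by omega) (fun s hs => by rw [hlen]; exact hb s (by simp [hs]))]
    by_cases hjr : j < r.length
    · rw [if_pos hjr]
      rw [List.getElem?_eq_getElem hjr]
      simp only [List.foldl_cons]
      rw [hstep, if_pos hjr]
      congr 1
      simp [List.getD, List.getElem?_eq_getElem hjr]
    · rw [if_neg hjr, hstep, if_neg hjr]

theorem pvFold_length (gr : List (List Int)) (mv : List Int) :
    (gr.foldl (fun mv r => pvARow mv 0 r) mv).length = mv.length := by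
  induction gr generalizing mv with
  | nil => rfl
  | cons r rest ih => simp only [List.foldl_cons]; rw [ih, pvARow_length]

theorem search_minimal_requirements_per_rounds_spec : Claim_equal_search_minimal_requirements_per_rounds := by
  intro gr _ hpre
  unfold Spec_search_minimal_requirements_per_rounds
  show (gr.foldl (fun mv r => pvARow mv 0 r) (List.replicate (gr.headD []).length (0 : Int))) =
    search_minimal_requirements_per_rounds_alt gr
  have hlenA : (gr.foldl (fun mv r => pvARow mv 0 r) (List.replicate (gr.headD []).length (0 : Int))).length = (gr.headD []).length := by
    rw [pvFold_length, List.length_replicate]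
  unfold search_minimal_requirements_per_rounds_alt
  apply List.ext_getElem
  · rw [hlenA, List.length_map, List.length_range]
  · intro j h1 h2
    have hj : j < (gr.headD []).length := by rw [hlenA] at h1; exact h1
    have hA : (gr.foldl (fun mv r => pvARow mv 0 r) (List.replicate (gr.headD []).length (0 : Int)))[j] =
        (gr.foldl (fun mv r => pvARow mv 0 r) (List.replicate (gr.headD []).length (0 : Int))).getD j 0 := by
      simp only [List.getD, List.getElem?_eq_getElem h1, Option.getD_some]
    rw [hA, pvFold_getD gr _ j (by simpa using hj)
      (fun r hr => by rw [List.length_replicate]; exact hpre.2 r hr)]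
    rw [List.getElem_map, List.getElem_range]
    simp only [List.getD, List.getElem?_replicate]
    rw [if_pos hj]
    rfl
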